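-- pv_equiv track=rewrite | github.com/afmwien/afmtool1 | gui/services/data_service.py | get_case_status
-- ===== SOURCE A (Python) =====
-- def get_case_status(case):
--     """Aktuellen Status eines Cases ermitteln"""
--     if not case.get("zeitstempel"):
--         return "erfassung"  # Neu erstellte Cases sind NEU
--
--     # Letzten Zeitstempel finden
--     timestamps = case["zeitstempel"]
--     if any("archivierung:" in ts for ts in timestamps):
--         return "archivierung"
--     elif any("validierung:" in ts for ts in timestamps):
--         return "validierung"
--     elif any("verarbeitung:" in ts for ts in timestamps):
--         return "verarbeitung"
--     else:
--         return "erfassung"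
-- ===== SOURCE B (Python) =====
-- _ORDER = ("archivierung", "validierung", "verarbeitung")
--
-- def _rank(ts):
--     """Priority rank of a single timestamp: index of the highest-priority marker it contains, 3 if none."""
--     for i, status in enumerate(_ORDER):
--         if status + ":" in ts:
--             return i
--     return 3
--
-- def get_case_status(case):
--     """Aktuellen Status eines Cases ermitteln"""
--     timestamps = case.get("zeitstempel")
--     if not timestamps:
--         return "erfassung"
--     best = min(map(_rank, timestamps))
--     return (_ORDER + ("erfassung",))[best]
-- ===== Notes on version B (the rewrite author's own statement) =====
-- stated objective: alternative
-- what changed: Maps each timestamp to a numeric priority rank (0..3), reduces with min over one pass, and indexes a status table with the minimal rank, instead of three separate short-circuiting any() membership scans in priority order.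
import Mathlib
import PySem

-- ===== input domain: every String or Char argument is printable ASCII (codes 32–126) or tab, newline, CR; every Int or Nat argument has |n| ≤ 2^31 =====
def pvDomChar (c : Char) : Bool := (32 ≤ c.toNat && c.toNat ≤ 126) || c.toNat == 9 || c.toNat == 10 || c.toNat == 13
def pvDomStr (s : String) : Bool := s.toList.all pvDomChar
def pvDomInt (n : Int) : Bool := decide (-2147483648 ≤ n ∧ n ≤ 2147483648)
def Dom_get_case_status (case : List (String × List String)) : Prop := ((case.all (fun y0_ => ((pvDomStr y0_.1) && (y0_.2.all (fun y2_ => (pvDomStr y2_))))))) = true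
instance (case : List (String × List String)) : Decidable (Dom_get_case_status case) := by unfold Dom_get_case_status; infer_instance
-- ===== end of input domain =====

-- B replaces three priority-ordered any() scans by a per-timestamp numeric rank, a min-reduction, and a table lookup (alternative decomposition, equal cost; return value only).


-- ===== PORT A =====
def get_case_status (case : List (String × List String)) : String :=
  match (PySem.Dict.mk case).get? "zeitstempel" with
  | none => "erfassung"
  | some ts =>
    if ts = [] then "erfassung"
    else if ts.any (fun t => PySem.Str.isIn "archivierung:" t) then "archivierung"
    else if ts.any (fun t => PySem.Str.isIn "validierung:" t) then "validierung"
    else if ts.any (fun t => PySem.Str.isIn "verarbeitung:" t) then "verarbeitung"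
    else "erfassung"

-- ===== PORT B =====
-- priority table, per-element rank, min-reduction, table lookup
def pvOrder : List String := ["archivierung", "validierung", "verarbeitung"]

-- _rank: index of the first status whose marker occurs in ts, 3 if none (Python loop over enumerate = findIdx?)
def pvRank (t : String) : Nat :=
  match pvOrder.findIdx? (fun s => PySem.Str.isIn (s ++ ":") t) with
  | some i => i
  | none => 3

def get_case_status_alt (case : List (String × List String)) : String :=
  match (PySem.Dict.mk case).get? "zeitstempel" with
  | none => "erfassung"
  | some ts =>
    if ts = [] then "erfassung"
    else
      -- min(map(_rank, timestamps)); the [] branch is unreachable (guarded above)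
      let best := match ts.map pvRank with
        | [] => 0
        | r :: rest => rest.foldl min r
      (pvOrder ++ ["erfassung"]).getD best ""

-- ===== PRECONDITION & SPEC =====
def Spec_get_case_status (case : List (String × List String)) (out : String) : Prop := out = get_case_status_alt case
instance (case : List (String × List String)) (out : String) : Decidable (Spec_get_case_status case out) := by unfold Spec_get_case_status; infer_instance

-- ===== CLAIM (what is proved, stated in full; the proofs are below) =====
def Claim_equal_get_case_status : Prop := ∀ (case : List (String × List String)), Dom_get_case_status case → Spec_get_case_status case (get_case_status case)

-- ===== LEMMAS AND PROOFS =====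

lemma pvRank_eq (t : String) :
    pvRank t = if PySem.Str.isIn "archivierung:" t then 0
      else if PySem.Str.isIn "validierung:" t then 1
      else if PySem.Str.isIn "verarbeitung:" t then 2 else 3 := by
  have hA : ("archivierung" ++ ":" : String) = "archivierung:" := rfl
  have hV : ("validierung" ++ ":" : String) = "validierung:" := rfl
  have hW : ("verarbeitung" ++ ":" : String) = "verarbeitung:" := rfl
  simp only [pvRank, pvOrder, List.findIdx?_cons, List.findIdx?_nil, hA, hV, hW]
  split_ifs <;> rfl

lemma pvRank_le (t : String) : pvRank t ≤ 3 := by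
  rw [pvRank_eq]; split_ifs <;> omega

-- the priority chain A computes, as a number
def pvChain (l : List String) : Nat :=
  if l.any (fun t => PySem.Str.isIn "archivierung:" t) then 0
  else if l.any (fun t => PySem.Str.isIn "validierung:" t) then 1
  else if l.any (fun t => PySem.Str.isIn "verarbeitung:" t) then 2 else 3

lemma pvChain_cons (h : String) (tl : List String) :
    pvChain (h :: tl) = min (pvRank h) (pvChain tl) := by
  rw [pvRank_eq]; unfold pvChain
  simp only [List.any_cons]
  rcases (PySem.Str.isIn "archivierung:" h).eq_false_or_eq_true with hA | hA <;>
    rcases (PySem.Str.isIn "validierung:" h).eq_false_or_eq_true with hV | hV <;>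
      rcases (PySem.Str.isIn "verarbeitung:" h).eq_false_or_eq_true with hW | hW <;>
        simp only [hA, hV, hW, Bool.true_or, Bool.false_or, reduceIte] <;>
          split_ifs <;> first | rfl | exact (False.elim (by assumption))

lemma foldl_min_rank (l : List String) (acc : Nat) (hacc : acc ≤ 3) :
    l.foldl (fun a t => min a (pvRank t)) acc = min acc (pvChain l) := by
  induction l generalizing acc with
  | nil => unfold pvChain; simp; omega
  | cons h tl ih =>
    rw [List.foldl_cons, ih (min acc (pvRank h)) (le_trans (Nat.min_le_left _ _) hacc),
      pvChain_cons, min_assoc]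

-- ===== VERDICT (by name: the statement is the Claim_ definition above) =====
theorem get_case_status_spec : Claim_equal_get_case_status := by
  intro case _
  unfold Spec_get_case_status get_case_status get_case_status_alt
  cases (PySem.Dict.mk case).get? "zeitstempel" with
  | none => rfl
  | some ts =>
    cases ts with
    | nil => rfl
    | cons h tl =>
      simp only [List.map_cons, List.foldl_map, if_neg (List.cons_ne_nil h tl)]
      rw [foldl_min_rank tl (pvRank h) (pvRank_le h), ← pvChain_cons]
      unfold pvChain
      split_ifs <;> rfl
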